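-- pv_equiv track=rewrite | github.com/ARM-software/sbmr-acs | lib/var_funcs.py | create_field_desc_regex
-- ===== SOURCE A (Python) =====
-- def create_field_desc_regex(line):
--     r"""
--     Create a field descriptor regular expression based on the input line and return it.
--
--     This function is designed for use by the list_to_report function (defined below).
--
--     Example:
--
--     Given the following input line:
--
--     --------   ------------ ------------------ ------------------------
--
--     This function will return this regular expression:
--
--     (.{8})   (.{12}) (.{18}) (.{24})
--
--     This means that other report lines interpreted using the regular expression are expected to have:
--     - An 8 character field
--     - 3 spaces
--     - A 12 character field
--     - One space
--     - An 18 character field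
--     - One space
--     - A 24 character field
--
--     Description of argument(s):
--     line                            A line consisting of dashes to represent fields and spaces to delimit
--                                     fields.
--     """
--
--     # Split the line into a descriptors list.  Example:
--     # descriptors:
--     #  descriptors[0]:            --------
--     #  descriptors[1]:
--     #  descriptors[2]:
--     #  descriptors[3]:            ------------
--     #  descriptors[4]:            ------------------
--     #  descriptors[5]:            ------------------------
--     descriptors = line.split(" ")
--
--     # Create regexes list.  Example:
--     # regexes:
--     #  regexes[0]:                (.{8})
--     #  regexes[1]:
--     #  regexes[2]:
--     #  regexes[3]:                (.{12})
--     #  regexes[4]:                (.{18})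
--     #  regexes[5]:                (.{24})
--     regexes = []
--     for descriptor in descriptors:
--         if descriptor == "":
--             regexes.append("")
--         else:
--             regexes.append("(.{" + str(len(descriptor)) + "})")
--
--     # Join the regexes list into a regex string.
--     field_desc_regex = " ".join(regexes)
--
--     return field_desc_regex
-- ===== SOURCE B (Python) =====
-- def create_field_desc_regex(line):
--     # Single left-to-right character scan: emit "(.{n})" at the end of each
--     # maximal run of non-space characters, copying spaces through unchanged.
--     parts = []
--     n = 0
--     for ch in line:
--         if ch == " ":
--             if n:
--                 parts.append("(.{%d})" % n)
--                 n = 0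
--             parts.append(" ")
--         else:
--             n += 1
--     if n:
--         parts.append("(.{%d})" % n)
--     return "".join(parts)
-- ===== Notes on version B (the rewrite author's own statement) =====
-- stated objective: alternative
-- what changed: Replaces split-on-space / per-descriptor loop / join with a single left-to-right character scan that counts runs of non-space characters and emits each field pattern in place, copying spaces through.
import Mathlib
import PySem

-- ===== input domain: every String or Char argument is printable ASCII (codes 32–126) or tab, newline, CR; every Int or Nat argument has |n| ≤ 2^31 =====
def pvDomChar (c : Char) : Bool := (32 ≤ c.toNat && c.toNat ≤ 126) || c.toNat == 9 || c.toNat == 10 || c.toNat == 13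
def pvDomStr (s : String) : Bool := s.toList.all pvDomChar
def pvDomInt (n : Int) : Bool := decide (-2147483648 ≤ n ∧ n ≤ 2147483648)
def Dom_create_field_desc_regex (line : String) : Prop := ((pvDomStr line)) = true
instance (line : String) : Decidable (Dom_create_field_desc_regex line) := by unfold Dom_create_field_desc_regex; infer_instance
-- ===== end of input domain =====

-- B replaces A's split/loop/join with a single character scan counting non-space runs; alternative decomposition, same cost.

-- ===== PORT A =====
-- line.split(" "), then per-descriptor append of "" or "(.{len})", then " ".join
def create_field_desc_regex (line : String) : String :=
  let descriptors := PySem.Chars.splitOn line.toList [' ']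
  let regexes := descriptors.foldl
    (fun acc d =>
      acc ++ [if d = ([] : List Char) then ([] : List Char)
              else ('(' :: '.' :: '{' :: PySem.Int.toChars (d.length : Int)) ++ ['}', ')']]) []
  String.ofList (PySem.Chars.join [' '] regexes)

-- ===== PORT B =====
-- "(.{n})" for a finished run of n non-space characters ("" when n = 0)
def pvEmit (n : Nat) : List Char :=
  if n = 0 then [] else ('(' :: '.' :: '{' :: PySem.Int.toChars (n : Int)) ++ ['}', ')']

def pvBStep (st : List Char × Nat) (c : Char) : List Char × Nat :=
  if c = ' ' then (st.1 ++ pvEmit st.2 ++ [' '], 0) else (st.1, st.2 + 1)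

def create_field_desc_regex_alt (line : String) : String :=
  let r := line.toList.foldl pvBStep ([], 0)
  String.ofList (r.1 ++ pvEmit r.2)

-- ===== PRECONDITION & SPEC =====
def Spec_create_field_desc_regex (line : String) (out : String) : Prop := out = create_field_desc_regex_alt line
instance (line : String) (out : String) : Decidable (Spec_create_field_desc_regex line out) := by unfold Spec_create_field_desc_regex; infer_instance

-- ===== CLAIM (what is proved, stated in full; the proofs are below) =====
def Claim_equal_create_field_desc_regex : Prop := ∀ (line : String), Dom_create_field_desc_regex line → Spec_create_field_desc_regex line (create_field_desc_regex line)

-- ===== LEMMAS AND PROOFS =====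

-- head (first field so far) and tail (remaining fields) of line.split(" ")
def pvF : List Char → List Char × List (List Char)
  | [] => ([], [])
  | c :: rest =>
      if c = ' ' then ([], (pvF rest).1 :: (pvF rest).2)
      else (c :: (pvF rest).1, (pvF rest).2)

-- the " field" blocks after the first field
def pvJ (ds : List (List Char)) : List Char :=
  (ds.map (fun d => ' ' :: pvEmit d.length)).flatten

theorem pvSplitOn_go_single (cs : List Char) :
    ∀ (fuel : Nat) (cur : List Char) (acc : List (List Char)), cs.length ≤ fuel →
      PySem.Chars.splitOn.go [' '] fuel cs cur acc
        = acc.reverse ++ (cur.reverse ++ (pvF cs).1) :: (pvF cs).2 := by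
  induction cs with
  | nil =>
      intro fuel cur acc _
      cases fuel <;> simp [PySem.Chars.splitOn.go, pvF]
  | cons c rest ih =>
      intro fuel cur acc h
      cases fuel with
      | zero => simp at h
      | succ fuel =>
        by_cases hc : c = ' '
        · subst hc
          rw [show PySem.Chars.splitOn.go [' '] (fuel + 1) (' ' :: rest) cur acc
                = PySem.Chars.splitOn.go [' '] fuel rest [] (cur.reverse :: acc) by
              simp [PySem.Chars.splitOn.go, List.isPrefixOf]]
          rw [ih fuel [] (cur.reverse :: acc) (by simpa using Nat.le_of_succ_le_succ h)]
          simp [pvF]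
        · rw [show PySem.Chars.splitOn.go [' '] (fuel + 1) (c :: rest) cur acc
                = PySem.Chars.splitOn.go [' '] fuel rest (c :: cur) acc by
              simp [PySem.Chars.splitOn.go, List.isPrefixOf, Ne.symm hc]]
          rw [ih fuel (c :: cur) acc (by simpa using Nat.le_of_succ_le_succ h)]
          simp [pvF, hc]

theorem pvSplitOn_eq (cs : List Char) :
    PySem.Chars.splitOn cs [' '] = ((pvF cs).1) :: (pvF cs).2 := by
  unfold PySem.Chars.splitOn
  rw [pvSplitOn_go_single cs (cs.length + 1) [] [] (by omega)]
  simp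

theorem pvJoin_emit (d : List Char) (ds : List (List Char)) :
    PySem.Chars.join [' '] ((d :: ds).map (fun x => pvEmit x.length))
      = pvEmit d.length ++ pvJ ds := by
  induction ds generalizing d with
  | nil => simp [PySem.Chars.join, pvJ, List.intercalate]
  | cons e es ih =>
      simp only [List.map_cons] at *
      rw [show PySem.Chars.join [' '] (pvEmit d.length :: pvEmit e.length :: es.map (fun x => pvEmit x.length))
            = pvEmit d.length ++ [' '] ++ PySem.Chars.join [' '] (pvEmit e.length :: es.map (fun x => pvEmit x.length)) by
        simp [PySem.Chars.join, List.intercalate, List.intersperse]]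
      rw [ih e]
      simp [pvJ]

theorem pvBStep_prefix (cs : List Char) :
    ∀ (acc : List Char) (n : Nat),
      List.foldl pvBStep (acc, n) cs
        = (acc ++ (List.foldl pvBStep ([], n) cs).1, (List.foldl pvBStep ([], n) cs).2) := by
  induction cs with
  | nil => intro acc n; simp
  | cons c rest ih =>
      intro acc n
      by_cases hc : c = ' '
      · subst hc
        simp only [List.foldl_cons, pvBStep, reduceIte]
        rw [ih (acc ++ pvEmit n ++ [' ']) 0, ih ([] ++ pvEmit n ++ [' ']) 0]
        simp
      · simp only [List.foldl_cons, pvBStep, if_neg hc]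
        exact ih acc (n + 1)

theorem pvMain (cs : List Char) :
    ∀ (n : Nat),
      (List.foldl pvBStep ([], n) cs).1 ++ pvEmit (List.foldl pvBStep ([], n) cs).2
        = pvEmit (n + (pvF cs).1.length) ++ pvJ (pvF cs).2 := by
  induction cs with
  | nil => intro n; simp [pvF, pvJ]
  | cons c rest ih =>
      intro n
      by_cases hc : c = ' '
      · subst hc
        simp only [List.foldl_cons, pvBStep, reduceIte]
        rw [pvBStep_prefix rest ([] ++ pvEmit n ++ [' ']) 0]
        simp only [List.nil_append, List.append_assoc]
        rw [ih 0]
        simp [pvF, pvJ]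
      · simp only [List.foldl_cons, pvBStep, if_neg hc]
        rw [ih (n + 1)]
        simp only [pvF, if_neg hc]
        have : n + 1 + (pvF rest).1.length = n + (c :: (pvF rest).1).length := by
          simp; omega
        rw [this]

theorem pvField_emit (d : List Char) :
    (if d = ([] : List Char) then ([] : List Char)
     else ('(' :: '.' :: '{' :: PySem.Int.toChars (d.length : Int)) ++ ['}', ')'])
      = pvEmit d.length := by
  by_cases hd : d = []
  · subst hd; simp [pvEmit]
  · rw [if_neg hd]
    rw [pvEmit, if_neg (by simpa [List.length_eq_zero_iff] using hd)]

-- ===== VERDICT (by name: the statement is the Claim_ definition above) =====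
theorem create_field_desc_regex_spec : Claim_equal_create_field_desc_regex := by
  intro line _
  unfold Spec_create_field_desc_regex create_field_desc_regex create_field_desc_regex_alt
  simp only [pvSplitOn_eq]
  rw [PySem.List.foldl_append_singleton_eq_map]
  have hmap : ((pvF line.toList).1 :: (pvF line.toList).2).map
      (fun d => if d = ([] : List Char) then ([] : List Char)
                else ('(' :: '.' :: '{' :: PySem.Int.toChars (d.length : Int)) ++ ['}', ')'])
      = ((pvF line.toList).1 :: (pvF line.toList).2).map (fun x => pvEmit x.length) := by
    apply List.map_congr_left
    intro d _
    exact pvField_emit d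
  rw [hmap]
  simp only [List.nil_append]
  rw [pvJoin_emit]
  rw [show (pvF line.toList).1.length = 0 + (pvF line.toList).1.length by omega]
  rw [← pvMain line.toList 0]
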